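-- pv_equiv track=rewrite | github.com/MrBrantCode/unitest_baseline | mut_generate/mist_train_cf/cf_88980/solution.py | count_unique_words
-- ===== SOURCE A (Python) =====
-- def count_unique_words(string):
--     unique_words = set()
--     current_word = ''
--     string = string.lower()
--
--     for char in string:
--         if char.isalnum() or char == "'":
--             current_word += char
--         elif char == ' ':
--             if current_word:
--                 unique_words.add(current_word)
--                 current_word = ''
--
--     if current_word:
--         unique_words.add(current_word)
--
--     return len(unique_words)
-- ===== SOURCE B (Python) =====
-- def count_unique_words(string):
--     s = string.lower()
--     filtered = ''.join(c for c in s if c.isalnum() or c == "'" or c == ' ')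
--     return len({w for w in filtered.split(' ') if w})
-- ===== Notes on version B (the rewrite author's own statement) =====
-- stated objective: idiomatic
-- what changed: Replaced the char-by-char accumulator state machine with a pipeline: keep only alphanumeric/apostrophe/space characters, split on single spaces, drop empty tokens, and take the size of the set of tokens.
import Mathlib
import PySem

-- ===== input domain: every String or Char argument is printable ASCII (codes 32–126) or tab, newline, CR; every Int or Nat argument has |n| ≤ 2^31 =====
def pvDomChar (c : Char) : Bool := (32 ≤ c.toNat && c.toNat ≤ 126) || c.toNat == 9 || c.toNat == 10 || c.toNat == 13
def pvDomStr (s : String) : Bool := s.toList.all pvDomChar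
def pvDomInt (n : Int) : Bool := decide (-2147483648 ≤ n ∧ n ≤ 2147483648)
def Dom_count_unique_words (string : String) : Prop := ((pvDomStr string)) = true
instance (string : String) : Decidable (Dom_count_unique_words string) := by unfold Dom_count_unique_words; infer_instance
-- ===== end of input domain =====

-- B replaces A's char-by-char accumulator state machine with a filter + split(' ') + set pipeline (idiomatic, same cost).

-- ===== PORT A =====
-- one step of A's for-loop: state = (unique_words, current_word)
def cuwStep (st : PySem.Set (List Char) × List Char) (c : Char) :
    PySem.Set (List Char) × List Char :=
  if PySem.Chars.isalnum c || c == '\'' then (st.1, st.2 ++ [c])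
  else if c == ' ' then
    (if st.2 == [] then st else (PySem.Set.add st.1 st.2, []))
  else st

def count_unique_words (string : String) : Int :=
  let st := (PySem.Chars.lower string.toList).foldl cuwStep (PySem.Set.empty, [])
  let fin := if st.2 == [] then st.1 else PySem.Set.add st.1 st.2
  (PySem.Set.len fin : Int)

-- ===== PORT B =====
def count_unique_words_alt (string : String) : Int :=
  let s := PySem.Chars.lower string.toList
  let filtered := s.filter (fun c => PySem.Chars.isalnum c || c == '\'' || c == ' ')
  let toks := PySem.Chars.splitOn filtered [' ']
  (PySem.Set.len (PySem.Set.ofList (toks.filter (fun w => !w.isEmpty))) : Int)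

-- ===== PRECONDITION & SPEC =====
def Spec_count_unique_words (string : String) (out : Int) : Prop := out = count_unique_words_alt string
instance (string : String) (out : Int) : Decidable (Spec_count_unique_words string out) := by unfold Spec_count_unique_words; infer_instance

-- ===== CLAIM (what is proved, stated in full; the proofs are below) =====
def Claim_equal_count_unique_words : Prop := ∀ (string : String), Dom_count_unique_words string → Spec_count_unique_words string (count_unique_words string)

-- ===== LEMMAS AND PROOFS =====

-- simple structural split-on-one-space, used only in the proofs
def splitSp : List Char → List (List Char)
  | [] => [[]]
  | c :: cs => if c = ' ' then [] :: splitSp cs else glue [c] (splitSp cs)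
where glue (w : List Char) : List (List Char) → List (List Char)
  | [] => [w]
  | t :: ts => (w ++ t) :: ts

theorem glue_glue (w v : List Char) (ts : List (List Char)) :
    splitSp.glue w (splitSp.glue v ts) = splitSp.glue (w ++ v) ts := by
  cases ts <;> simp [splitSp.glue]

theorem glue_nil (ts : List (List Char)) (h : ts ≠ []) : splitSp.glue [] ts = ts := by
  cases ts <;> simp_all [splitSp.glue]

theorem splitSp_ne_nil (cs : List Char) : splitSp cs ≠ [] := by
  induction cs with
  | nil => simp [splitSp]
  | cons c cs ih =>
    simp only [splitSp]
    split
    · simp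
    · cases h : splitSp cs <;> simp [splitSp.glue]

theorem splitOn_go_eq_splitSp (l : List Char) : ∀ (fuel : Nat) (cur : List Char)
    (acc : List (List Char)), l.length ≤ fuel →
    PySem.Chars.splitOn.go [' '] fuel l cur acc =
      acc.reverse ++ splitSp.glue cur.reverse (splitSp l) := by
  induction l with
  | nil => intro fuel cur acc _; cases fuel <;> simp [PySem.Chars.splitOn.go, splitSp, splitSp.glue]
  | cons c cs ih =>
    intro fuel cur acc hf
    cases fuel with
    | zero => simp at hf
    | succ fuel =>
      simp only [PySem.Chars.splitOn.go]
      by_cases hc : c = ' '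
      · subst hc
        rw [if_pos (by simp [List.isPrefixOf])]
        simp only [List.length_cons, List.length_nil, List.drop_succ_cons, List.drop_zero]
        rw [ih fuel [] (List.cons cur.reverse acc) (by simpa using hf)]
        cases h : splitSp cs with
        | nil => exact absurd h (splitSp_ne_nil cs)
        | cons t ts => simp [splitSp, h, splitSp.glue]
      · rw [if_neg (by simp [List.isPrefixOf]; exact fun h => hc h.symm)]
        rw [ih fuel (c :: cur) acc (by simpa using hf)]
        simp [splitSp, hc, glue_glue]

theorem splitOn_space_eq_splitSp (cs : List Char) :
    PySem.Chars.splitOn cs [' '] = splitSp cs := by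
  rw [PySem.Chars.splitOn, splitOn_go_eq_splitSp cs (cs.length + 1) [] [] (by omega)]
  simp [glue_nil _ (splitSp_ne_nil cs)]

def keepC (c : Char) : Bool := PySem.Chars.isalnum c || c == '\'' || c == ' '

def tokens (ts : List (List Char)) : List (List Char) := ts.filter (fun w => !w.isEmpty)

theorem isalnum_space : PySem.Chars.isalnum ' ' = false := by decide

def finalize (st : PySem.Set (List Char) × List Char) : PySem.Set (List Char) :=
  if st.2 == [] then st.1 else PySem.Set.add st.1 st.2

theorem main_inv (cs : List Char) : ∀ (s : PySem.Set (List Char)) (cur : List Char),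
    finalize (cs.foldl cuwStep (s, cur)) =
      PySem.Set.update s (tokens (splitSp.glue cur (splitSp (cs.filter keepC)))) := by
  induction cs with
  | nil =>
    intro s cur
    by_cases h : cur = [] <;>
      simp [finalize, splitSp, splitSp.glue, tokens, h, PySem.Set.update, List.filter]
  | cons c cs ih =>
    intro s cur
    simp only [List.foldl_cons]
    by_cases h1 : (PySem.Chars.isalnum c || c == '\'') = true
    · have hc : c ≠ ' ' := by
        rintro rfl; simp [isalnum_space] at h1
      rw [show cuwStep (s, cur) c = (s, cur ++ [c]) by simp [cuwStep, h1]]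
      rw [ih]
      simp [keepC, h1, List.filter_cons, splitSp, hc, glue_glue]
    · by_cases h2 : c = ' '
      · subst h2
        by_cases h3 : cur = []
        · rw [show cuwStep (s, cur) ' ' = (s, cur) by simp [cuwStep, h1, h3, isalnum_space]]
          rw [ih, h3]
          rw [glue_nil _ (splitSp_ne_nil _)]
          rw [show List.filter keepC (' ' :: cs) = ' ' :: List.filter keepC cs from by
                simp [keepC]]
          rw [show splitSp (' ' :: List.filter keepC cs)
                = [] :: splitSp (List.filter keepC cs) from by simp [splitSp]]
          rw [glue_nil _ (by simp)]
          simp [tokens]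
        · rw [show cuwStep (s, cur) ' ' = (PySem.Set.add s cur, []) by
                simp [cuwStep, h1, h3, isalnum_space]]
          rw [ih]
          rw [glue_nil _ (splitSp_ne_nil _)]
          rw [show List.filter keepC (' ' :: cs) = ' ' :: List.filter keepC cs from by
                simp [keepC]]
          rw [show splitSp (' ' :: List.filter keepC cs)
                = [] :: splitSp (List.filter keepC cs) from by simp [splitSp]]
          rw [show splitSp.glue cur ([] :: splitSp (List.filter keepC cs))
                = cur :: splitSp (List.filter keepC cs) from by simp [splitSp.glue]]
          rw [show tokens (cur :: splitSp (List.filter keepC cs))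
                = cur :: tokens (splitSp (List.filter keepC cs)) from by
                simp [tokens, h3]]
          simp [PySem.Set.update]
      · have hk : keepC c = false := by simp [keepC, h1, h2]
        rw [show cuwStep (s, cur) c = (s, cur) by simp [cuwStep, h1, h2]]
        rw [ih]
        simp [hk]

-- ===== VERDICT (by name: the statement is the Claim_ definition above) =====
theorem count_unique_words_spec : Claim_equal_count_unique_words := by
  intro string _
  unfold Spec_count_unique_words
  show (PySem.Set.len (finalize ((PySem.Chars.lower string.toList).foldl cuwStep
      (PySem.Set.empty, []))) : Int) = count_unique_words_alt string
  rw [main_inv, glue_nil _ (splitSp_ne_nil _)]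
  show _ = (PySem.Set.len (PySem.Set.ofList (List.filter (fun w => !w.isEmpty)
      (PySem.Chars.splitOn (List.filter
        (fun c => PySem.Chars.isalnum c || c == '\'' || c == ' ')
        (PySem.Chars.lower string.toList)) [' ']))) : Int)
  rw [splitOn_space_eq_splitSp]
  simp only [tokens, PySem.Set.update, PySem.Set.ofList_eq_foldl, PySem.Set.empty]
  rfl
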